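-- pv_equiv track=rewrite | github.com/wukaiyeah/Multimodal_analysis_in_bladder_cancer | WSI_image/script/tiles_choice.py | gen_tiles_dict
-- ===== SOURCE A (Python) =====
-- def gen_tiles_dict(tiles_path, cases_id):
--     # 生成dict
--     tiles_dict = {}
--     for case_id in cases_id:
--         path_list = []
--         for path in tiles_path:
--             if case_id in path:
--                 path_list.append(path)
--         tiles_dict[case_id] = path_list
--     return tiles_dict
-- ===== SOURCE B (Python) =====
-- def gen_tiles_dict(tiles_path, cases_id):
--     # substring-index scan: instead of testing every (case_id, path) pair, scan each
--     # path once, enumerating its substrings of the case-id lengths and looking them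
--     # up in a hash set of case_ids
--     id_set = set(cases_id)
--     lengths = sorted({len(c) for c in cases_id})
--     result = {c: [] for c in cases_id}
--     for path in tiles_path:
--         n = len(path)
--         found = set()
--         for L in lengths:
--             if L > n:
--                 break
--             for i in range(n - L + 1):
--                 sub = path[i:i+L]
--                 if sub in id_set:
--                     found.add(sub)
--         for c in found:
--             result[c].append(path)
--     return result
-- ===== Notes on version B (the rewrite author's own statement) =====
-- stated objective: faster
-- what changed: A tests every (case_id, path) pair with Python's substring operator in a case-major nested scan; B builds a hash set of case_ids plus the sorted set of their distinct lengths and scans each path once, enumerating its substrings of those lengths and looking them up in the set, then appends the path to every case_id found, so the cost no longer grows with the number of case_ids.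
import Mathlib
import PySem

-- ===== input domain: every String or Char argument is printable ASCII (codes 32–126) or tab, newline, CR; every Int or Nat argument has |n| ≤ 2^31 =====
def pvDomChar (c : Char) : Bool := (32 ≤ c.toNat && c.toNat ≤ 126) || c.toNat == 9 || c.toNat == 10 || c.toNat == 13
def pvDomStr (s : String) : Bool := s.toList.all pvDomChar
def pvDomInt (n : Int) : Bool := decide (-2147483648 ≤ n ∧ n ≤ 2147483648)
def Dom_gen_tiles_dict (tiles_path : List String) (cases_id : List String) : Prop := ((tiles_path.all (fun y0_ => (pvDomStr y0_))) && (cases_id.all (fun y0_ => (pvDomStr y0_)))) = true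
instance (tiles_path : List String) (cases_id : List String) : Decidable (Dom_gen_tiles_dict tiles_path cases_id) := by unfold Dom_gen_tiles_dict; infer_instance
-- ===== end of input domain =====

-- B replaces A's case-major nested 'case_id in path' scan by a substring-index scan:
-- a hash set of case_ids and the sorted set of their distinct lengths, one pass over each
-- path enumerating its substrings of those lengths and looking them up in the set, so the
-- cost no longer grows with the number of case_ids (objective: faster; measured faster by
-- a timing run).

-- ===== PORT A =====
-- A: for each case_id, scan all of tiles_path collecting the paths containing it, then bind it in the dict.
def gen_tiles_dict (tiles_path : List String) (cases_id : List String) : List (String × List String) :=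
  (cases_id.foldl
    (fun (tiles_dict : PySem.Dict String (List String)) case_id =>
      tiles_dict.insert case_id
        (tiles_path.foldl
          (fun path_list path =>
            if PySem.Str.isIn case_id path then path_list ++ [path] else path_list)
          []))
    PySem.Dict.empty).items

-- ===== PORT B =====
-- 'for L in lengths: if L > n: break; for i in range(n-L+1): sub = path[i:i+L]; if sub in id_set: found.add(sub)'
def pvFound (idSet : PySem.Set String) (path : String) :
    List Int → PySem.Set String → PySem.Set String
  | [], found => found
  | L :: rest, found =>
    if L > PySem.Str.len path then found
    else pvFound idSet path rest
      ((PySem.List.pyRange 0 (PySem.Str.len path - L + 1) 1).foldl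
        (fun found i =>
          let sub := PySem.Str.slice path (some i) (some (i + L))
          if PySem.Set.contains idSet sub then PySem.Set.add found sub else found)
        found)

-- B: id_set = set(cases_id); lengths = sorted({len(c) for c in cases_id}); result = {c: [] for c in cases_id};
-- one pass over tiles_path, collecting per path the set 'found' of contained ids, appending path to each.
def gen_tiles_dict_alt (tiles_path : List String) (cases_id : List String) : List (String × List String) :=
  let idSet : PySem.Set String := PySem.Set.ofList cases_id
  let lengths : List Int :=
    PySem.List.sorted (PySem.Set.ofList (cases_id.map (fun c => PySem.Str.len c))) (fun x => x) false
  let result0 : PySem.Dict String (List String) :=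
    cases_id.foldl (fun d c => d.insert c ([] : List String)) PySem.Dict.empty
  (tiles_path.foldl
    (fun (d : PySem.Dict String (List String)) path =>
      (pvFound idSet path lengths PySem.Set.empty).foldl
        (fun d c => d.modify c [] (fun l => l ++ [path])) d)
    result0).items

-- ===== PRECONDITION & SPEC =====
def Spec_gen_tiles_dict (tiles_path : List String) (cases_id : List String) (out : List (String × List String)) : Prop := out = gen_tiles_dict_alt tiles_path cases_id
instance (tiles_path : List String) (cases_id : List String) (out : List (String × List String)) : Decidable (Spec_gen_tiles_dict tiles_path cases_id out) := by unfold Spec_gen_tiles_dict; infer_instance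

-- ===== CLAIM (what is proved, stated in full; the proofs are below) =====
def Claim_equal_gen_tiles_dict : Prop := ∀ (tiles_path : List String) (cases_id : List String), Dom_gen_tiles_dict tiles_path cases_id → Spec_gen_tiles_dict tiles_path cases_id (gen_tiles_dict tiles_path cases_id)

-- ===== LEMMAS AND PROOFS =====

-- common normal form: one entry per distinct case_id, with the paths containing it
def pvGroup (tp cs : List String) : List (String × List String) :=
  (PySem.Set.ofList cs).map (fun c => (c, tp.filter (fun p => PySem.Str.isIn c p)))

theorem pvMemAdd (s : PySem.Set String) (x y : String) :
    x ∈ PySem.Set.add s y ↔ x = y ∨ x ∈ s := by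
  simp only [PySem.Set.add]
  split <;> rename_i h
  · simp_all
  · simp_all
    tauto

theorem pvGetD_insert_fold (l : List String) (v : String → List String) (c : String) :
    ∀ d : PySem.Dict String (List String),
      (l.foldl (fun d x => d.insert x (v x)) d).getD c [] =
        if c ∈ l then v c else d.getD c [] := by
  induction l with
  | nil => simp
  | cons a t ih =>
    intro d
    simp only [List.foldl_cons, ih, List.mem_cons]
    by_cases hc : c ∈ t
    · simp [hc]
    · by_cases hca : c = a
      · subst hca; simp [PySem.Dict.getD_insert_self]
      · simp [hc, hca, PySem.Dict.getD_insert]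

theorem pvFilterBeq (l : List String) (c : String) (h : l.Nodup) :
    l.filter (fun y => y == c) = if c ∈ l then [c] else [] := by
  induction l with
  | nil => simp
  | cons a t ih =>
    simp only [List.nodup_cons] at h
    by_cases hac : a = c
    · subst hac
      have hf : List.filter (fun y => y == a) t = [] :=
        List.filter_eq_nil_iff.2 (fun b hb => by simp; rintro rfl; exact h.1 hb)
      simp [hf]
    · have h1 : (a == c) = false := by simp [hac]
      have h2 : ¬c = a := fun h' => hac h'.symm
      simp only [List.filter_cons, h1, Bool.false_eq_true, if_false, ih h.2, List.mem_cons, h2,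
        false_or]

-- A's dict = pvGroup
theorem pvA_eq (tp cs : List String) : gen_tiles_dict tp cs = pvGroup tp cs := by
  unfold gen_tiles_dict pvGroup
  have hkeys : (cs.foldl
      (fun (d : PySem.Dict String (List String)) case_id =>
        d.insert case_id
          (tp.foldl (fun path_list path =>
              if PySem.Str.isIn case_id path then path_list ++ [path] else path_list) []))
      PySem.Dict.empty).keys = PySem.Set.ofList cs := by
    rw [PySem.Dict.keys_foldl_insert]
    simp [PySem.Set.update_nil_left]
  have hnd : (cs.foldl
      (fun (d : PySem.Dict String (List String)) case_id =>
        d.insert case_id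
          (tp.foldl (fun path_list path =>
              if PySem.Str.isIn case_id path then path_list ++ [path] else path_list) []))
      PySem.Dict.empty).keys.Nodup := by
    rw [hkeys]; exact PySem.Set.nodup_ofList cs
  rw [PySem.Dict.items_eq_map_keys _ hnd [], hkeys]
  apply List.map_congr_left
  intro c hc
  rw [pvGetD_insert_fold]
  simp only [(PySem.Set.mem_ofList cs c).1 hc, if_pos]
  rw [PySem.List.foldl_append_if_eq_filter]
  rw [List.nil_append]

-- membership in the inner 'for i in range(...)' fold
theorem pvInnerMem (idSet : PySem.Set String) (path : String) (L : Int)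
    (is : List Int) (x : String) :
    ∀ found : PySem.Set String,
      (x ∈ is.foldl (fun found i =>
          let sub := PySem.Str.slice path (some i) (some (i + L))
          if PySem.Set.contains idSet sub then PySem.Set.add found sub else found) found
        ↔ x ∈ found ∨ (x ∈ idSet ∧
            ∃ i ∈ is, PySem.Str.slice path (some i) (some (i + L)) = x)) := by
  induction is with
  | nil => simp
  | cons j t ih =>
    intro found
    simp only [List.foldl_cons, ih, List.mem_cons]
    by_cases h : PySem.Set.contains idSet (PySem.Str.slice path (some j) (some (j + L))) = true
    · have hmem := (PySem.Set.contains_iff idSet _).1 h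
      simp only [h, if_pos, pvMemAdd]
      constructor
      · rintro ((rfl | hf) | hrest)
        · exact Or.inr ⟨hmem, j, Or.inl rfl, rfl⟩
        · exact Or.inl hf
        · rcases hrest with ⟨hid, i, hi, hsl⟩
          exact Or.inr ⟨hid, i, Or.inr hi, hsl⟩
      · rintro (hf | ⟨hid, i, (rfl | hi), hsl⟩)
        · exact Or.inl (Or.inr hf)
        · exact Or.inl (Or.inl hsl.symm)
        · exact Or.inr ⟨hid, i, hi, hsl⟩
    · have h' : PySem.Set.contains idSet (PySem.Str.slice path (some j) (some (j + L))) = false :=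
        by simpa using h
      have hnm : PySem.Str.slice path (some j) (some (j + L)) ∉ idSet := by
        intro hm; exact h ((PySem.Set.contains_iff idSet _).2 hm)
      simp only [h', Bool.false_eq_true, if_false]
      constructor
      · rintro (hf | ⟨hid, i, hi, hsl⟩)
        · exact Or.inl hf
        · exact Or.inr ⟨hid, i, Or.inr hi, hsl⟩
      · rintro (hf | ⟨hid, i, (rfl | hi), hsl⟩)
        · exact Or.inl hf
        · exact absurd (hsl ▸ hid) hnm
        · exact Or.inr ⟨hid, i, hi, hsl⟩

theorem pvSliceToList (path : String) (i L : Int) (h0 : 0 ≤ i) (hL : 0 ≤ L) :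
    (PySem.Str.slice path (some i) (some (i + L))).toList
      = (path.toList.drop i.toNat).take L.toNat := by
  rw [PySem.Str.toList_slice, PySem.Chars.slice_eq_listSlice,
      PySem.List.slice_toNat _ h0 (by omega)]
  congr 1; omega

-- the substrings of length L found by the scan are exactly the length-L infixes
theorem pvSliceChar (path x : String) (L : Int) (hL : 0 ≤ L)
    (hLe : L ≤ PySem.Str.len path) :
    ((∃ i ∈ PySem.List.pyRange 0 (PySem.Str.len path - L + 1) 1,
        PySem.Str.slice path (some i) (some (i + L)) = x)
      ↔ (PySem.Str.len x = L ∧ PySem.Str.isIn x path = true)) := by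
  rw [PySem.Str.len_eq] at hLe
  constructor
  · rintro ⟨i, hi, rfl⟩
    rw [PySem.List.mem_pyRange_one, PySem.Str.len_eq] at hi
    have h0 : 0 ≤ i := hi.1
    have hib : i.toNat + L.toNat ≤ path.toList.length := by omega
    have hsl := pvSliceToList path i L h0 hL
    have hxl : (PySem.Str.slice path (some i) (some (i + L))).toList.length = L.toNat := by
      rw [hsl, List.length_take, List.length_drop]; omega
    constructor
    · rw [PySem.Str.len_eq, hxl]; omega
    · rw [PySem.Str.isIn_iff_infix, hsl]
      exact List.infix_iff_prefix_suffix.2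
        ⟨path.toList.drop i.toNat, List.take_prefix _ _, List.drop_suffix _ _⟩
  · rintro ⟨hxL, hin⟩
    rw [PySem.Str.isIn_iff_infix] at hin
    have hxlen : x.toList.length = L.toNat := by
      rw [PySem.Str.len_eq] at hxL; omega
    obtain ⟨j, hj⟩ := (PySem.Chars.exists_prefix_drop_iff_isIn x.toList path.toList).2
      ((PySem.Chars.isIn_iff_infix _ _).2 hin)
    set n := path.toList.length with hn
    have hj' : x.toList <+: path.toList.drop (min j n) := by
      rcases le_or_gt j n with h | h
      · simpa [min_eq_left h] using hj
      · have hdrop : path.toList.drop j = [] := List.drop_of_length_le (by omega)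
        rw [hdrop] at hj
        have hx0 : x.toList = [] := List.prefix_nil.1 hj
        simp [hx0]
    have hlenle : x.toList.length ≤ n - min j n := by
      have hh := List.IsPrefix.length_le hj'
      rw [List.length_drop, ← hn] at hh
      exact hh
    refine ⟨((min j n : Nat) : Int), ?_, ?_⟩
    · rw [PySem.List.mem_pyRange_one, PySem.Str.len_eq]
      constructor
      · exact Int.natCast_nonneg _
      · omega
    · have h0 : (0:Int) ≤ ((min j n : Nat) : Int) := Int.natCast_nonneg _
      apply String.toList_inj.1
      rw [pvSliceToList path _ L h0 hL]
      have hmn : ((min j n : Nat) : Int).toNat = min j n := by omega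
      rw [hmn, ← hxlen]
      exact (List.prefix_iff_eq_take.1 hj').symm

-- the set 'found' after the length loop: exactly the case_ids contained in path
theorem pvFoundMem (idSet : PySem.Set String) (path x : String) :
    ∀ (lens : List Int) (found : PySem.Set String),
      lens.Pairwise (· ≤ ·) → (∀ L ∈ lens, 0 ≤ L) →
      (x ∈ pvFound idSet path lens found ↔
        x ∈ found ∨ (x ∈ idSet ∧ PySem.Str.len x ∈ lens ∧
          PySem.Str.isIn x path = true)) := by
  intro lens
  induction lens with
  | nil => intro found _ _; simp [pvFound]
  | cons L rest ih =>
    intro found hp h0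
    rw [pvFound]
    split <;> rename_i hbr
    · -- break: L > len path; nothing with length in L::rest can be contained in path
      have hno : ¬(PySem.Str.len x ∈ L :: rest ∧ PySem.Str.isIn x path = true) := by
        rintro ⟨hmem, hin⟩
        have hinf := (PySem.Str.isIn_iff_infix x path).1 hin
        have hle : x.toList.length ≤ path.toList.length := List.IsInfix.length_le hinf
        have hlx : PySem.Str.len x ≤ PySem.Str.len path := by
          simp only [PySem.Str.len_eq]; exact_mod_cast hle
        rcases List.mem_cons.1 hmem with h | h
        · omega
        · have := (List.pairwise_cons.1 hp).1 _ h; omega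
      constructor
      · intro h; exact Or.inl h
      · rintro (h | ⟨_, hmem, hin⟩)
        · exact h
        · exact absurd ⟨hmem, hin⟩ hno
    · -- no break: L ≤ len path
      have hLlen : L ≤ PySem.Str.len path := by omega
      have hL0 : 0 ≤ L := h0 L List.mem_cons_self
      rw [ih _ (List.pairwise_cons.1 hp).2 (fun L' hL' => h0 L' (List.mem_cons_of_mem _ hL'))]
      rw [pvInnerMem]
      have hch := pvSliceChar path x L hL0 hLlen
      constructor
      · rintro ((hf | ⟨hid, hex⟩) | ⟨hid, hmem, hin⟩)
        · exact Or.inl hf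
        · have hc := hch.1 hex
          exact Or.inr ⟨hid, hc.1 ▸ List.mem_cons_self, hc.2⟩
        · exact Or.inr ⟨hid, List.mem_cons_of_mem _ hmem, hin⟩
      · rintro (hf | ⟨hid, hmem, hin⟩)
        · exact Or.inl (Or.inl hf)
        · rcases List.mem_cons.1 hmem with h | h
          · exact Or.inl (Or.inr ⟨hid, hch.2 ⟨h, hin⟩⟩)
          · exact Or.inr ⟨hid, h, hin⟩

theorem pvInnerNodup (idSet : PySem.Set String) (path : String) (L : Int)
    (is : List Int) :
    ∀ found : PySem.Set String, found.Nodup →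
      (is.foldl (fun found i =>
          let sub := PySem.Str.slice path (some i) (some (i + L))
          if PySem.Set.contains idSet sub then PySem.Set.add found sub else found) found).Nodup := by
  induction is with
  | nil => intro found h; exact h
  | cons j t ih =>
    intro found h
    simp only [List.foldl_cons]
    apply ih
    dsimp only
    split
    · exact PySem.Set.nodup_add _ _ h
    · exact h

theorem pvFound_nodup (idSet : PySem.Set String) (path : String) :
    ∀ (lens : List Int) (found : PySem.Set String), found.Nodup →
      (pvFound idSet path lens found).Nodup := by
  intro lens
  induction lens with
  | nil => intro found h; simpa [pvFound] using h
  | cons L rest ih =>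
    intro found h
    rw [pvFound]
    split
    · exact h
    · exact ih _ (pvInnerNodup idSet path L _ found h)

theorem pvFound_sub (idSet : PySem.Set String) (path : String) :
    ∀ (lens : List Int) (found : PySem.Set String) (x : String),
      x ∈ pvFound idSet path lens found → x ∈ found ∨ x ∈ idSet := by
  intro lens
  induction lens with
  | nil => intro found x h; exact Or.inl (by simpa [pvFound] using h)
  | cons L rest ih =>
    intro found x h
    rw [pvFound] at h
    split at h
    · exact Or.inl h
    · rcases ih _ x h with h' | h'
      · rcases (pvInnerMem idSet path L _ x found).1 h' with hf | ⟨hid, _⟩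
        · exact Or.inl hf
        · exact Or.inr hid
      · exact Or.inr h'

-- 'for c in found: result[c].append(path)' seen through getD
theorem pvStep_getD (d : PySem.Dict String (List String)) (found : List String)
    (hnd : found.Nodup) (path c : String) :
    (found.foldl (fun d c' => d.modify c' [] (fun l => l ++ [path])) d).getD c []
      = d.getD c [] ++ (if c ∈ found then [path] else []) := by
  have h1 : found.foldl (fun d c' => d.modify c' [] (fun l => l ++ [path])) d
      = (found.map (fun c' => (c', path))).foldl
          (fun d p => d.modify p.1 [] (fun l => l ++ [p.2])) d := by
    rw [List.foldl_map]
  rw [h1, PySem.Dict.getD_foldl_modify_append]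
  congr 1
  rw [List.filter_map]
  have h2 : ((fun p : String × String => p.1 == c) ∘ fun c' => (c', path))
      = fun y => y == c := rfl
  rw [h2, pvFilterBeq _ _ hnd]
  split <;> simp

theorem pvStep_keys (d : PySem.Dict String (List String)) (found : List String)
    (path : String) (h : ∀ x ∈ found, x ∈ d.keys) :
    (found.foldl (fun d c' => d.modify c' [] (fun l => l ++ [path])) d).keys = d.keys := by
  rw [PySem.Dict.keys_foldl_modify, PySem.Set.update_eq_append_filter]
  have hf : (PySem.Set.ofList found).filter
      (fun y => !(PySem.Set.contains d.keys y)) = [] := by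
    apply List.filter_eq_nil_iff.2
    intro y hy
    have : y ∈ d.keys := h y ((PySem.Set.mem_ofList found y).1 hy)
    simp [this]
  rw [hf, List.append_nil]

-- keys stay = set(cases_id) through B's path loop
theorem pvB_keys (idSet : PySem.Set String) (lens : List Int) (tp : List String) :
    ∀ d : PySem.Dict String (List String), (∀ x ∈ idSet, x ∈ d.keys) →
      (tp.foldl
        (fun (d : PySem.Dict String (List String)) path =>
          (pvFound idSet path lens PySem.Set.empty).foldl
            (fun d c => d.modify c [] (fun l => l ++ [path])) d)
        d).keys = d.keys := by
  induction tp with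
  | nil => intro d _; rfl
  | cons p t ih =>
    intro d hsub
    simp only [List.foldl_cons]
    have hstep := pvStep_keys d (pvFound idSet p lens PySem.Set.empty) p
      (fun x hx => by
        rcases pvFound_sub idSet p lens PySem.Set.empty x hx with h | h
        · simp [PySem.Set.empty] at h
        · exact hsub x h)
    rw [ih _ (fun x hx => hstep ▸ hsub x hx), hstep]

-- B's value at a case_id c through the path loop
theorem pvB_getD (idSet : PySem.Set String) (lens : List Int) (c : String)
    (hp : lens.Pairwise (· ≤ ·)) (h0 : ∀ L ∈ lens, 0 ≤ L)
    (hcid : c ∈ idSet) (hclen : PySem.Str.len c ∈ lens) (tp : List String) :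
    ∀ d : PySem.Dict String (List String),
      (tp.foldl
        (fun (d : PySem.Dict String (List String)) path =>
          (pvFound idSet path lens PySem.Set.empty).foldl
            (fun d c => d.modify c [] (fun l => l ++ [path])) d)
        d).getD c []
      = d.getD c [] ++ tp.filter (fun p => PySem.Str.isIn c p) := by
  induction tp with
  | nil => intro d; simp
  | cons p t ih =>
    intro d
    simp only [List.foldl_cons, ih]
    rw [pvStep_getD _ _ (pvFound_nodup idSet p lens PySem.Set.empty List.nodup_nil) p c]
    have hmem : c ∈ pvFound idSet p lens PySem.Set.empty ↔ PySem.Str.isIn c p = true := by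
      rw [pvFoundMem idSet p c lens PySem.Set.empty hp h0]
      constructor
      · rintro (h | ⟨_, _, h⟩)
        · exact absurd h (by simp [PySem.Set.empty])
        · exact h
      · intro h; exact Or.inr ⟨hcid, hclen, h⟩
    rw [List.filter_cons]
    by_cases hin : PySem.Str.isIn c p = true
    · simp only [hin, if_pos, hmem.2 hin, List.append_assoc]
      rfl
    · have : c ∉ pvFound idSet p lens PySem.Set.empty := fun h => hin (hmem.1 h)
      simp only [hin, Bool.false_eq_true, if_false, this, List.append_nil]

-- B's dict = pvGroup
theorem pvB_eq (tp cs : List String) : gen_tiles_dict_alt tp cs = pvGroup tp cs := by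
  unfold gen_tiles_dict_alt pvGroup
  simp only []
  set idSet : PySem.Set String := PySem.Set.ofList cs with hid
  set lens : List Int :=
    PySem.List.sorted (PySem.Set.ofList (cs.map (fun c => PySem.Str.len c))) (fun x => x) false
    with hlens
  set d0 : PySem.Dict String (List String) :=
    cs.foldl (fun d c => d.insert c ([] : List String)) PySem.Dict.empty with hd0
  have hkeys0 : d0.keys = PySem.Set.ofList cs := by
    rw [hd0, PySem.Dict.keys_foldl_insert]
    simp [PySem.Set.update_nil_left]
  have hkeys := pvB_keys idSet lens tp d0
    (fun x hx => by rw [hkeys0]; exact hx)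
  have hnd : (tp.foldl
      (fun (d : PySem.Dict String (List String)) path =>
        (pvFound idSet path lens PySem.Set.empty).foldl
          (fun d c => d.modify c [] (fun l => l ++ [path])) d)
      d0).keys.Nodup := by
    rw [hkeys, hkeys0]; exact PySem.Set.nodup_ofList cs
  rw [PySem.Dict.items_eq_map_keys _ hnd [], hkeys, hkeys0]
  apply List.map_congr_left
  intro c hc
  have hcs : c ∈ cs := (PySem.Set.mem_ofList cs c).1 hc
  have hpair : lens.Pairwise (· ≤ ·) := by
    rw [hlens]
    have := PySem.List.sorted_pairwise
      (PySem.Set.ofList (cs.map (fun c => PySem.Str.len c))) (fun x => x)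
    exact this
  have hpos : ∀ L ∈ lens, 0 ≤ L := by
    intro L hL
    rw [hlens, PySem.List.mem_sorted] at hL
    rcases List.mem_map.1 ((PySem.Set.mem_ofList _ _).1 hL) with ⟨y, _, rfl⟩
    rw [PySem.Str.len_eq]; exact Int.natCast_nonneg _
  have hclen : PySem.Str.len c ∈ lens := by
    rw [hlens, PySem.List.mem_sorted, PySem.Set.mem_ofList]
    exact List.mem_map.2 ⟨c, hcs, rfl⟩
  rw [pvB_getD idSet lens c hpair hpos hc hclen tp d0]
  have hg0 : d0.getD c [] = [] := by
    rw [hd0, pvGetD_insert_fold cs (fun _ => []) c]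
    split <;> simp
  rw [hg0, List.nil_append]

-- ===== VERDICT (by name: the statement is the Claim_ definition above) =====
theorem gen_tiles_dict_spec : Claim_equal_gen_tiles_dict := by
  intro tp cs _
  unfold Spec_gen_tiles_dict
  rw [pvA_eq, pvB_eq]
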